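-- pv_equiv track=rewrite | github.com/taxijjang/algorithm | rook here 3/2번.py | solution
-- ===== SOURCE A (Python) =====
-- def solution(message, K):
--     word = message.split()
--     res =""
--     cnt =0
--     word_len = 0
--     for w_cnt , w in enumerate(word):
--         word_len += len(w)
--         cnt = word_len + w_cnt
--
--         if cnt <= K:
--             res += w
--
--         else:
--             break
--
--         res += " "
--     res = res[:-1]
--     return res
-- ===== SOURCE B (Python) =====
-- def solution(message, K):
--     words = message.split()
--     cum = []
--     total = 0
--     for w in words:
--         total += len(w)
--         cum.append(total)
--     n = next((i for i, c in enumerate(cum) if c + i > K), len(words))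
--     return " ".join(words[:n])
-- ===== Notes on version B (the rewrite author's own statement) =====
-- stated objective: simpler
-- what changed: A builds the result string incrementally inside one loop (append word, append space, break on overflow, strip the last char); B decomposes into phases: build a cumulative word-length table, find the first index where cumlen[i]+i exceeds K, and join words[:n] once.
import Mathlib
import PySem

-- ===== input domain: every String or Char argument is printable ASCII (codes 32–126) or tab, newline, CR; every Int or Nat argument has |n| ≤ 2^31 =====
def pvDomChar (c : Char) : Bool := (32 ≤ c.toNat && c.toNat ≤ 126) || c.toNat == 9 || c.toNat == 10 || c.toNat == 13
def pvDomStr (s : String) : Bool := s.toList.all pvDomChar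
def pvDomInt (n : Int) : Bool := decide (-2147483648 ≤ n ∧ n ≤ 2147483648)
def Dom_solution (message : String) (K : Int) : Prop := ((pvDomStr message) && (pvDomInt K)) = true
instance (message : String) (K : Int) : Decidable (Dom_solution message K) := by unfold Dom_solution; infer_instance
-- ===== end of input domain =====

-- B replaces A's single incremental append-and-break string loop by a two-phase
-- decomposition: a cumulative word-length table, then find the cutoff index and join once (objective: simpler).

-- ===== PORT A =====
-- the for-loop over enumerate(word): state = (res, word_len), index counter i; break returns res as is
def pvALoop (K : Int) : List String → Int → List Char → Int → List Char
  | [], _, res, _ => res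
  | w :: rest, i, res, wl =>
    let wl' := wl + (PySem.Str.len w : Int)
    let cnt := wl' + i
    if cnt ≤ K then pvALoop K rest (i + 1) (res ++ w.toList ++ [' ']) wl'
    else res

def solution (message : String) (K : Int) : String :=
  let word := PySem.Str.split₀ message
  let res := pvALoop K word 0 [] 0
  String.ofList (PySem.List.slice res none (some (-1)))   -- res[:-1]

-- ===== PORT B =====
-- cumulative length table (Source B's first loop, building cum with running total)
def pvCum : List String → Int → List Int
  | [], _ => []
  | w :: ws, t =>
    let t' := t + (PySem.Str.len w : Int)
    t' :: pvCum ws t'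

-- next((i for i, c in enumerate(cum) if c + i > K), len(words)): first index violating the budget
def pvCut (K : Int) : List Int → Int → Nat
  | [], _ => 0
  | c :: cs, i => if c + i > K then 0 else 1 + pvCut K cs (i + 1)

def solution_alt (message : String) (K : Int) : String :=
  let words := PySem.Str.split₀ message
  let cum := pvCum words 0
  let n := pvCut K cum 0
  PySem.Str.join " " (words.take n)

-- ===== PRECONDITION & SPEC =====
def Spec_solution (message : String) (K : Int) (out : String) : Prop := out = solution_alt message K
instance (message : String) (K : Int) (out : String) : Decidable (Spec_solution message K out) := by unfold Spec_solution; infer_instance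

-- ===== CLAIM (what is proved, stated in full; the proofs are below) =====
def Claim_equal_solution : Prop := ∀ (message : String) (K : Int), Dom_solution message K → Spec_solution message K (solution message K)

-- ===== LEMMAS AND PROOFS =====

-- A's loop appends each kept word followed by one space; the kept words are exactly words.take (pvCut K (pvCum words wl) i)
theorem pvALoop_eq (K : Int) (ws : List String) : ∀ (i wl : Int) (res : List Char),
    pvALoop K ws i res wl =
      res ++ ((ws.take (pvCut K (pvCum ws wl) i)).map (fun w => w.toList ++ [' '])).flatten := by
  induction ws with
  | nil => intro i wl res; simp [pvALoop, pvCum, pvCut]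
  | cons w rest ih =>
    intro i wl res
    simp only [pvALoop, pvCum, pvCut]
    by_cases h : wl + (PySem.Str.len w : Int) + i ≤ K
    · rw [if_pos h, if_neg (by omega), ih, Nat.add_comm 1]
      simp [List.take_succ_cons, List.append_assoc]
    · rw [if_neg h, if_pos (by omega)]
      simp

-- dropping the final trailing space turns the flat append-with-spaces into a space-join
theorem pvFlatten_dropLast (xs : List (List Char)) :
    ((xs.map (fun w => w ++ [' '])).flatten).dropLast = PySem.Chars.join [' '] xs := by
  induction xs with
  | nil => simp [PySem.Chars.join_nil]
  | cons x ys ih =>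
    cases ys with
    | nil => simp [PySem.Chars.join_singleton]
    | cons y zs =>
      simp only [List.map_cons, List.flatten_cons] at ih ⊢
      rw [PySem.Chars.join_cons_cons, List.dropLast_append_of_ne_nil (by simp), ih]

theorem pvSlice_neg_one (l : List Char) : PySem.List.slice l none (some (-1)) = l.dropLast := by
  simp [pysem]

-- ===== VERDICT (by name: the statement is the Claim_ definition above) =====
theorem solution_spec : Claim_equal_solution := by
  intro message K _
  simp only [Spec_solution, solution, solution_alt]
  rw [pvALoop_eq, pvSlice_neg_one]
  simp only [List.nil_append]
  rw [show ((PySem.Str.split₀ message).take (pvCut K (pvCum (PySem.Str.split₀ message) 0) 0)).map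
        (fun w => w.toList ++ [' '])
      = (((PySem.Str.split₀ message).take (pvCut K (pvCum (PySem.Str.split₀ message) 0) 0)).map
        String.toList).map (fun w => w ++ [' ']) from by rw [List.map_map]; rfl]
  rw [pvFlatten_dropLast,
      show ([' '] : List Char) = (" " : String).toList from rfl,
      ← PySem.Str.toList_join, String.ofList_toList]
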